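-- pv_equiv track=rewrite | github.com/maiviet283/code-python-co-ban | CauTrucDuLieu/dict.py | duyet
-- ===== SOURCE A (Python) =====
-- def duyet(arr):
--     arr2 = []
--     to_remove = set()
--     for i in arr:
--         for j in i:
--             arr2.append(j)
--     for i, sublist in enumerate(arr):
--         for j in sublist:
--             if arr2.count(j) >= 2:
--                 to_remove.add(i)
--                 arr2.remove(j)
--     new_arr = [sublist for i, sublist in enumerate(arr) if i not in to_remove]
--     return new_arr
-- ===== SOURCE B (Python) =====
-- def duyet(arr):
--     # Lookahead over the flattened stream: flatten once while remembering each
--     # element's owning sublist index, then walk the stream left to right and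
--     # mark an owner whenever its current value occurs again later in the stream.
--     flat = []
--     owner = []
--     for i, sub in enumerate(arr):
--         flat.extend(sub)
--         owner.extend([i] * len(sub))
--     to_remove = set()
--     rest = flat
--     for o in owner:
--         v, rest = rest[0], rest[1:]
--         if v in rest:
--             to_remove.add(o)
--     return [sub for i, sub in enumerate(arr) if i not in to_remove]
-- ===== Notes on version B (the rewrite author's own statement) =====
-- stated objective: alternative
-- what changed: Replaces A's mutate-and-recount pass (list.count >= 2 tests with .remove on a flattened copy feeding a to_remove index set) by a lookahead scan of a flattened value/owner stream: each element's owner is marked exactly when its value occurs again later in the stream; no counting, no removal, no mutation of a counted structure.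
import Mathlib
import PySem

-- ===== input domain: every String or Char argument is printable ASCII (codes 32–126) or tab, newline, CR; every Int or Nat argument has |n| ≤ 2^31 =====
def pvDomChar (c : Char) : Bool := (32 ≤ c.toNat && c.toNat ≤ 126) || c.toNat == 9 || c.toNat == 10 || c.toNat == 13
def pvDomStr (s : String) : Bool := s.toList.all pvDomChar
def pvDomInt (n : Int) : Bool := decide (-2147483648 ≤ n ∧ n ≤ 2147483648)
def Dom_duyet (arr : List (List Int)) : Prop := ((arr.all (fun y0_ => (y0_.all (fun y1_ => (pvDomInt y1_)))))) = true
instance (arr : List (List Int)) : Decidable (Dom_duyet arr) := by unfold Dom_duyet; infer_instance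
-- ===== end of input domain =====

-- B replaces A's count-and-remove pass over a mutated flattened copy by a lookahead scan of a
-- flattened value/owner stream (an alternative algorithm, similar cost); return values agree everywhere.

-- ===== PORT A =====
-- inner 'for j in sublist: if arr2.count(j) >= 2: to_remove.add(i); arr2.remove(j)'
-- (arr2.remove(j) cannot raise here: the count test guarantees j ∈ arr2, so .getD is never taken)
def duyetInner (i : Int) (st : List Int × PySem.Set Int) (sub : List Int) : List Int × PySem.Set Int :=
  sub.foldl (fun st j =>
    if 2 ≤ PySem.List.count st.1 j then
      ((PySem.List.remove? st.1 j).getD st.1, PySem.Set.add st.2 i)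
    else st) st

def duyet (arr : List (List Int)) : List (List Int) :=
  let arr2 := arr.foldl (fun acc i => i.foldl (fun a j => a ++ [j]) acc) []
  let st := (PySem.List.enumerate arr 0).foldl (fun st pr => duyetInner pr.1 st pr.2) (arr2, PySem.Set.empty)
  ((PySem.List.enumerate arr 0).filter (fun pr => !(List.contains st.2 pr.1))).map (·.2)

-- ===== PORT B =====
-- 'v, rest = rest[0], rest[1:]; if v in rest: to_remove.add(o)'
-- (rest[0] cannot raise: len(rest) always equals the number of owners still to process, so .getD is never taken)
def altMark (st : List Int × PySem.Set Int) (o : Int) : List Int × PySem.Set Int :=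
  let v := (PySem.List.pyGet? st.1 0).getD 0
  let rest := PySem.List.slice st.1 (some 1) none
  if rest.contains v then (rest, PySem.Set.add st.2 o) else (rest, st.2)

def duyet_alt (arr : List (List Int)) : List (List Int) :=
  -- 'flat.extend(sub); owner.extend([i] * len(sub))'
  let fo := (PySem.List.enumerate arr 0).foldl
    (fun (fo : List Int × List Int) pr => (fo.1 ++ pr.2, fo.2 ++ List.replicate pr.2.length pr.1)) ([], [])
  let st := fo.2.foldl altMark (fo.1, PySem.Set.empty)
  ((PySem.List.enumerate arr 0).filter (fun pr => !(List.contains st.2 pr.1))).map (·.2)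

-- ===== PRECONDITION & SPEC =====
def Spec_duyet (arr : List (List Int)) (out : List (List Int)) : Prop := out = duyet_alt arr
instance (arr : List (List Int)) (out : List (List Int)) : Decidable (Spec_duyet arr out) := by unfold Spec_duyet; infer_instance

-- ===== CLAIM (what is proved, stated in full; the proofs are below) =====
def Claim_equal_duyet : Prop := ∀ (arr : List (List Int)), Dom_duyet arr → Spec_duyet arr (duyet arr)

-- ===== LEMMAS AND PROOFS =====

-- middle spec: a sublist is dropped iff it holds a non-final occurrence of some value
def hasNF : List Int → List Int → Bool
  | [], _ => false
  | j :: tl, rest => (tl ++ rest).contains j || hasNF tl rest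

def keep : List (List Int) → List (List Int)
  | [] => []
  | sub :: tl => if hasNF sub (tl.flatMap id) then keep tl else sub :: keep tl

theorem duyetInner_cons (i j : Int) (arr2 : List Int) (s : PySem.Set Int) (tl : List Int) :
    duyetInner i (arr2, s) (j :: tl) =
      if 2 ≤ PySem.List.count arr2 j then
        duyetInner i ((PySem.List.remove? arr2 j).getD arr2, PySem.Set.add s i) tl
      else duyetInner i (arr2, s) tl := by
  simp only [duyetInner, List.foldl_cons]
  by_cases h : 2 ≤ PySem.List.count arr2 j <;> rw [PySem.List.count_eq] at h <;> simp [h]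

theorem la_flat (arr : List (List Int)) (acc : List Int) :
    arr.foldl (fun acc i => i.foldl (fun a j => a ++ [j]) acc) acc = acc ++ arr.flatMap id := by
  induction arr generalizing acc with
  | nil => simp
  | cons sub tl ih =>
    rw [List.foldl_cons, PySem.List.foldl_append_singleton, ih, List.flatMap_cons]
    simp

theorem la_inner (sub rest arr2 : List Int) (s : PySem.Set Int) (i : Int)
    (hinv : ∀ v ∈ sub ++ rest, arr2.count v = (sub ++ rest).count v) :
    (∀ v ∈ rest, (duyetInner i (arr2, s) sub).1.count v = rest.count v) ∧
    (∀ x, x ∈ (duyetInner i (arr2, s) sub).2 ↔ x ∈ s ∨ (x = i ∧ hasNF sub rest = true)) := by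
  induction sub generalizing arr2 s with
  | nil =>
    refine ⟨fun v hv => hinv v (by simpa using hv), fun x => ?_⟩
    simp [duyetInner, hasNF]
  | cons j tl ih =>
    have hj : arr2.count j = (tl ++ rest).count j + 1 := by
      have := hinv j (by simp)
      simpa [List.count_cons] using this
    by_cases hmem : j ∈ tl ++ rest
    · have hpos : 0 < (tl ++ rest).count j := List.count_pos_iff.mpr hmem
      have hcnt : 2 ≤ PySem.List.count arr2 j := by
        rw [PySem.List.count_eq]; omega
      have hjarr : j ∈ arr2 := by
        rw [← List.count_pos_iff]; omega
      have hstep : duyetInner i (arr2, s) (j :: tl)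
          = duyetInner i (arr2.erase j, PySem.Set.add s i) tl := by
        rw [duyetInner_cons, if_pos hcnt, PySem.List.remove?_eq_some_erase arr2 j hjarr,
          Option.getD_some]
      have hinv' : ∀ v ∈ tl ++ rest, (arr2.erase j).count v = (tl ++ rest).count v := by
        intro v hv
        by_cases hvj : v = j
        · subst hvj
          rw [List.count_erase_self]; omega
        · rw [List.count_erase_of_ne hvj]
          have hjv : j ≠ v := fun h => hvj h.symm
          have := hinv v (by simp [hv])
          simpa [List.count_cons, hjv] using this
      obtain ⟨h1, h2⟩ := ih (arr2.erase j) (PySem.Set.add s i) hinv'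
      rw [hstep]
      refine ⟨h1, fun x => ?_⟩
      rw [h2, PySem.Set.mem_add]
      have hNF : hasNF (j :: tl) rest = true := by
        simp [hasNF, hmem]
      rw [hNF]
      tauto
    · have hz : (tl ++ rest).count j = 0 := List.count_eq_zero.mpr hmem
      have hcnt : ¬ 2 ≤ PySem.List.count arr2 j := by
        rw [PySem.List.count_eq]; omega
      have hstep : duyetInner i (arr2, s) (j :: tl) = duyetInner i (arr2, s) tl := by
        rw [duyetInner_cons, if_neg hcnt]
      have hinv' : ∀ v ∈ tl ++ rest, arr2.count v = (tl ++ rest).count v := by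
        intro v hv
        have hjv : j ≠ v := fun h => hmem (h ▸ hv)
        have := hinv v (by simp [hv])
        simpa [List.count_cons, hjv] using this
      obtain ⟨h1, h2⟩ := ih arr2 s hinv'
      rw [hstep]
      refine ⟨h1, fun x => ?_⟩
      rw [h2]
      have hNF : hasNF (j :: tl) rest = hasNF tl rest := by
        simp [hasNF, hmem]
      rw [hNF]

theorem la_outer (tl : List (List Int)) (k : Int) (arr2 : List Int) (s : PySem.Set Int)
    (hinv : ∀ v ∈ tl.flatMap id, arr2.count v = (tl.flatMap id).count v) (x : Int) :
    x ∈ ((PySem.List.enumerate tl k).foldl (fun st pr => duyetInner pr.1 st pr.2) (arr2, s)).2 ↔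
      x ∈ s ∨ ∃ m : Nat, ∃ _ : m < tl.length,
        x = k + m ∧ hasNF tl[m] ((tl.drop (m+1)).flatMap id) = true := by
  induction tl generalizing k arr2 s with
  | nil => simp [PySem.List.enumerate_nil]
  | cons sub tl ih =>
    rw [PySem.List.enumerate_cons, List.foldl_cons]
    have hinv1 : ∀ v ∈ sub ++ tl.flatMap id, arr2.count v = (sub ++ tl.flatMap id).count v := by
      intro v hv
      have := hinv v (by simpa [List.flatMap_cons] using hv)
      simpa [List.flatMap_cons] using this
    obtain ⟨h1, h2⟩ := la_inner sub (tl.flatMap id) arr2 s k hinv1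
    rcases hp : duyetInner k (arr2, s) sub with ⟨a1, s1⟩
    rw [hp] at h1 h2
    rw [ih (k+1) a1 s1 h1]
    constructor
    · rintro (hx | ⟨m, hm, hxm, hnf⟩)
      · rcases (h2 x).mp hx with hx' | ⟨rfl, hnf⟩
        · exact Or.inl hx'
        · refine Or.inr ⟨0, by simp, by simp, ?_⟩
          exact hnf
      · refine Or.inr ⟨m + 1, by simpa using hm, by push_cast at hxm ⊢; omega, ?_⟩
        simpa using hnf
    · rintro (hx | ⟨m, hm, hxm, hnf⟩)
      · exact Or.inl ((h2 x).mpr (Or.inl hx))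
      · cases m with
        | zero =>
          refine Or.inl ((h2 x).mpr (Or.inr ⟨by simpa using hxm, ?_⟩))
          exact hnf
        | succ m =>
          refine Or.inr ⟨m, by simpa using hm, by push_cast at hxm ⊢; omega, ?_⟩
          exact hnf

theorem la_filter (arr : List (List Int)) (k : Int) (P : Int → Bool)
    (hP : ∀ m : Nat, ∀ _ : m < arr.length, P (k + m) = hasNF arr[m] ((arr.drop (m+1)).flatMap id)) :
    ((PySem.List.enumerate arr k).filter (fun pr => !(P pr.1))).map (·.2) = keep arr := by
  induction arr generalizing k with
  | nil => simp [keep, PySem.List.enumerate_nil]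
  | cons sub tl ih =>
    rw [PySem.List.enumerate_cons]
    have h0 : P k = hasNF sub (tl.flatMap id) := by
      have := hP 0 (by simp)
      simpa using this
    have hrec := ih (k + 1) (fun m hm => by
      have h := hP (m + 1) (by simpa using hm)
      rw [show (k + ((m + 1 : Nat) : Int)) = (k + 1) + (m : Int) from by push_cast; ring] at h
      simpa using h)
    cases hNF : hasNF sub (tl.flatMap id) with
    | false =>
      rw [hNF] at h0
      rw [keep, hNF, if_neg (by simp)]
      simp only [List.filter_cons, h0]
      simpa using hrec
    | true =>
      rw [hNF] at h0
      rw [keep, hNF, if_pos rfl]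
      simp only [List.filter_cons, h0]
      simpa using hrec

theorem duyet_eq_keep (arr : List (List Int)) : duyet arr = keep arr := by
  show ((PySem.List.enumerate arr 0).filter (fun pr =>
      !(List.contains ((PySem.List.enumerate arr 0).foldl (fun st pr => duyetInner pr.1 st pr.2)
        (arr.foldl (fun acc i => i.foldl (fun a j => a ++ [j]) acc) [], PySem.Set.empty)).2 pr.1))).map (·.2) = keep arr
  rw [la_flat arr [], List.nil_append]
  apply la_filter arr 0
  intro m hm
  have hmem := fun x => la_outer arr 0 (arr.flatMap id) PySem.Set.empty (fun v _ => rfl) x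
  have hiff : ((0 : Int) + (m : Int)) ∈ ((PySem.List.enumerate arr 0).foldl (fun st pr => duyetInner pr.1 st pr.2)
      (arr.flatMap id, PySem.Set.empty)).2 ↔ hasNF arr[m] ((arr.drop (m+1)).flatMap id) = true := by
    rw [hmem]
    constructor
    · rintro (h | ⟨m', hm', heq, hnf⟩)
      · simp [PySem.Set.empty] at h
      · have hmm : m' = m := by
          have := heq
          push_cast at this
          omega
        subst hmm
        exact hnf
    · intro h
      exact Or.inr ⟨m, hm, by ring, h⟩
  rw [Bool.eq_iff_iff]
  simpa [List.contains_iff_mem] using hiff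

-- ===== B-side lemmas =====

-- the owner stream: each sublist index repeated once per element
def owners : List (List Int) → Int → List Int
  | [], _ => []
  | sub :: tl, k => List.replicate sub.length k ++ owners tl (k + 1)

theorem lb_build (arr : List (List Int)) (k : Int) (acc : List Int × List Int) :
    (PySem.List.enumerate arr k).foldl
      (fun (fo : List Int × List Int) pr => (fo.1 ++ pr.2, fo.2 ++ List.replicate pr.2.length pr.1)) acc
    = (acc.1 ++ arr.flatMap id, acc.2 ++ owners arr k) := by
  induction arr generalizing k acc with
  | nil => simp [PySem.List.enumerate_nil, owners]
  | cons sub tl ih =>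
    rw [PySem.List.enumerate_cons, List.foldl_cons, ih]
    simp [owners, List.flatMap_cons]

-- the marks produced while one owner segment is consumed
def segSet : List Int → List Int → Int → PySem.Set Int → PySem.Set Int
  | [], _, _, s => s
  | j :: tl, r, k, s => segSet tl r k (if (tl ++ r).contains j then PySem.Set.add s k else s)

theorem lb_seg (sub : List Int) (r ow : List Int) (k : Int) (s : PySem.Set Int) :
    (List.replicate sub.length k ++ ow).foldl altMark (sub ++ r, s)
    = ow.foldl altMark (r, segSet sub r k s) := by
  induction sub generalizing s with
  | nil => simp [segSet]
  | cons j tl ih =>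
    rw [List.length_cons, List.replicate_succ, List.cons_append]
    show List.foldl altMark (altMark (j :: (tl ++ r), s) k) (List.replicate tl.length k ++ ow)
        = List.foldl altMark (r, segSet (j :: tl) r k s) ow
    have hstep : altMark (j :: (tl ++ r), s) k
        = (tl ++ r, if (tl ++ r).contains j then PySem.Set.add s k else s) := by
      simp only [altMark, PySem.List.pyGet?_zero_cons, Option.getD_some,
        PySem.List.slice_from_one, List.tail_cons]
      split_ifs <;> rfl
    rw [hstep, ih]
    rfl

theorem mem_segSet (sub r : List Int) (k : Int) (s : PySem.Set Int) (x : Int) :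
    x ∈ segSet sub r k s ↔ x ∈ s ∨ (x = k ∧ hasNF sub r = true) := by
  induction sub generalizing s with
  | nil => simp [segSet, hasNF]
  | cons j tl ih =>
    rw [segSet, ih, hasNF]
    by_cases h : (tl ++ r).contains j
    · rw [if_pos h, PySem.Set.mem_add]
      simp only [h, Bool.true_or]
      tauto
    · rw [if_neg h]
      simp only [Bool.or_eq_true, List.contains_eq_mem, decide_eq_true_eq] at h ⊢
      simp [h]

theorem lb_outer (tl : List (List Int)) (k : Int) (s : PySem.Set Int) (x : Int) :
    x ∈ ((owners tl k).foldl altMark (tl.flatMap id, s)).2 ↔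
      x ∈ s ∨ ∃ m : Nat, ∃ _ : m < tl.length,
        x = k + m ∧ hasNF tl[m] ((tl.drop (m+1)).flatMap id) = true := by
  induction tl generalizing k s with
  | nil => simp [owners]
  | cons sub tl ih =>
    rw [owners, List.flatMap_cons]
    simp only [id_eq]
    rw [lb_seg, ih, mem_segSet]
    constructor
    · rintro ((hx | ⟨rfl, hnf⟩) | ⟨m, hm, hxm, hnf⟩)
      · exact Or.inl hx
      · refine Or.inr ⟨0, by simp, by simp, ?_⟩
        exact hnf
      · refine Or.inr ⟨m + 1, by simpa using hm, by push_cast at hxm ⊢; omega, ?_⟩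
        simpa using hnf
    · rintro (hx | ⟨m, hm, hxm, hnf⟩)
      · exact Or.inl (Or.inl hx)
      · cases m with
        | zero =>
          refine Or.inl (Or.inr ⟨by simpa using hxm, ?_⟩)
          exact hnf
        | succ m =>
          refine Or.inr ⟨m, by simpa using hm, by push_cast at hxm ⊢; omega, ?_⟩
          exact hnf

theorem duyet_alt_eq_keep (arr : List (List Int)) : duyet_alt arr = keep arr := by
  show ((PySem.List.enumerate arr 0).filter (fun pr =>
      !(List.contains (((PySem.List.enumerate arr 0).foldl
        (fun (fo : List Int × List Int) pr => (fo.1 ++ pr.2, fo.2 ++ List.replicate pr.2.length pr.1))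
        ([], [])).2.foldl altMark
        (((PySem.List.enumerate arr 0).foldl
        (fun (fo : List Int × List Int) pr => (fo.1 ++ pr.2, fo.2 ++ List.replicate pr.2.length pr.1))
        ([], [])).1, PySem.Set.empty)).2 pr.1))).map (·.2) = keep arr
  rw [lb_build arr 0 ([], [])]
  simp only [List.nil_append]
  apply la_filter arr 0
  intro m hm
  have hiff : ((0 : Int) + (m : Int)) ∈ ((owners arr 0).foldl altMark (arr.flatMap id, PySem.Set.empty)).2
      ↔ hasNF arr[m] ((arr.drop (m+1)).flatMap id) = true := by
    rw [lb_outer]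
    constructor
    · rintro (h | ⟨m', hm', heq, hnf⟩)
      · simp [PySem.Set.empty] at h
      · have hmm : m' = m := by omega
        subst hmm
        exact hnf
    · intro h
      exact Or.inr ⟨m, hm, by ring, h⟩
  rw [Bool.eq_iff_iff]
  simpa [List.contains_iff_mem] using hiff

-- ===== VERDICT (by name: the statement is the Claim_ definition above) =====
theorem duyet_spec : Claim_equal_duyet := by
  intro arr _
  unfold Spec_duyet
  rw [duyet_eq_keep, duyet_alt_eq_keep]
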